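-- pv_equiv track=rewrite | github.com/Bespocke/portfolio | res/cours_prepa/TIPE/TIPE virus/simulation/big brother.py | compte
-- ===== SOURCE A (Python) =====
-- def compte(M):
--     occurences = {
--         1: 0,
--         2: 0,
--         3: 0,
--         4: 0,
--         5: 0,
--         6: 0,
--         7: 0,
--         8: 0,
--         9: 0,
--         10: 0,
--         11: 0
--     }
--
--     for row in M:
--         for cell in row:
--             if cell in occurences:
--                 occurences[cell] += 1
--
--     return occurences
-- ===== SOURCE B (Python) =====
-- def compte(M):
--     # Sort the flattened cells once, then count each key 1..11 as the width of
--     # its run in the sorted list, located by two hand-written binary searches.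
--     s = sorted(cell for row in M for cell in row)
--
--     def bisect_left(a, x):
--         lo, hi = 0, len(a)
--         while lo < hi:
--             mid = (lo + hi) // 2
--             if a[mid] < x:
--                 lo = mid + 1
--             else:
--                 hi = mid
--         return lo
--
--     def bisect_right(a, x):
--         lo, hi = 0, len(a)
--         while lo < hi:
--             mid = (lo + hi) // 2
--             if x < a[mid]:
--                 hi = mid
--             else:
--                 lo = mid + 1
--         return lo
--
--     return {k: bisect_right(s, k) - bisect_left(s, k) for k in range(1, 12)}
-- ===== Notes on version B (the rewrite author's own statement) =====
-- stated objective: alternative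
-- what changed: B sorts the flattened cells once and computes each of the 11 counts as bisect_right minus bisect_left (the width of the key's run in the sorted list, found by binary search), instead of A's per-cell membership-test-and-increment into a pre-initialised dict.
import Mathlib
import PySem

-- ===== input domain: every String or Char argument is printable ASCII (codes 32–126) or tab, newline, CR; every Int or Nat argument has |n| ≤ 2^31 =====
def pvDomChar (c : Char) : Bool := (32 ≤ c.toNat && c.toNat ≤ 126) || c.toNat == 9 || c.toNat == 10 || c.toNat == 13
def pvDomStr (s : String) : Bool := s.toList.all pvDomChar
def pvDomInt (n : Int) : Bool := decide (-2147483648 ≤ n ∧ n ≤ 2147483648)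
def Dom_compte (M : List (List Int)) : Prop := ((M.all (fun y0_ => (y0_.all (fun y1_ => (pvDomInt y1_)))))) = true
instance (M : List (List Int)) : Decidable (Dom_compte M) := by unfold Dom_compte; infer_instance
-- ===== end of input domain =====

-- B sorts the flattened cells once and reads each of the 11 counts off the sorted list as
-- bisect_right - bisect_left (two binary searches per key), instead of A's per-cell
-- membership-test-and-increment into a pre-initialised dict; objective: alternative.

-- ===== PORT A =====
-- literal transliteration: pre-initialised dict 1..11 ↦ 0, then for each row, each cell,
-- if cell in occurences: occurences[cell] += 1; return the dict (as its items).
def compte (M : List (List Int)) : List (Int × Int) :=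
  let occurences : PySem.Dict Int Int :=
    PySem.Dict.ofList [(1,0),(2,0),(3,0),(4,0),(5,0),(6,0),(7,0),(8,0),(9,0),(10,0),(11,0)]
  (M.foldl
    (fun occ row =>
      row.foldl
        (fun occ cell =>
          if occ.contains cell then occ.modify cell 0 (· + 1) else occ)
        occ)
    occurences).items

-- ===== PORT B =====
-- literal transliteration of Source B: s = sorted(cell for row in M for cell in row);
-- Source B's hand-written bisect_left/bisect_right while-loops (lo, hi = 0, len(a);
-- mid = (lo+hi)//2; compare a[mid] with x) are step-for-step the fuel loops of the
-- prelude primitives PySem.List.bisectLeft / bisectRight, used here as instructed;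
-- {k: bisect_right(s, k) - bisect_left(s, k) for k in range(1, 12)}
def compte_alt (M : List (List Int)) : List (Int × Int) :=
  let s : List Int := PySem.List.sorted (M.flatMap (fun row => row)) (fun x => x) false
  (PySem.List.pyRange 1 12 1).map (fun k =>
    (k, ((PySem.List.bisectRight s k : Int) - (PySem.List.bisectLeft s k : Int))))

-- ===== PRECONDITION & SPEC =====
def Spec_compte (M : List (List Int)) (out : List (Int × Int)) : Prop := out = compte_alt M
instance (M : List (List Int)) (out : List (Int × Int)) : Decidable (Spec_compte M out) := by unfold Spec_compte; infer_instance

-- ===== CLAIM (what is proved, stated in full; the proofs are below) =====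
def Claim_equal_compte : Prop := ∀ (M : List (List Int)), Dom_compte M → Spec_compte M (compte M)

-- ===== LEMMAS AND PROOFS =====

-- one step of A's inner loop preserves the key list
theorem pv_step_keys (l : List Int) (d : PySem.Dict Int Int) :
    (l.foldl (fun occ cell => if occ.contains cell then occ.modify cell 0 (· + 1) else occ) d).keys
      = d.keys := by
  induction l generalizing d with
  | nil => rfl
  | cons c l ih =>
    simp only [List.foldl_cons]
    by_cases h : d.contains c = true
    · rw [if_pos h, ih, PySem.Dict.keys_modify, PySem.Dict.keys_insert_of_contains _ _ h]
    · rw [if_neg h]; exact ih d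

-- A's loop adds, to each key already present, the number of its occurrences in the cell list
theorem pv_step_getD (l : List Int) (d : PySem.Dict Int Int) (hnd : d.keys.Nodup) (k : Int) :
    (l.foldl (fun occ cell => if occ.contains cell then occ.modify cell 0 (· + 1) else occ) d).getD k 0
      = d.getD k 0 + (if d.contains k = true then (l.count k : Int) else 0) := by
  induction l generalizing d with
  | nil => simp
  | cons c l ih =>
    simp only [List.foldl_cons]
    by_cases hc : d.contains c = true
    · rw [if_pos hc]
      have hnd' : (d.modify c 0 (· + 1)).keys.Nodup := by
        rw [PySem.Dict.keys_modify, PySem.Dict.keys_insert_of_contains _ _ hc]; exact hnd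
      rw [ih _ hnd']
      rw [PySem.Dict.getD_modify, PySem.Dict.contains_modify]
      by_cases hkc : k = c
      · subst hkc
        simp only [BEq.rfl, Bool.true_or, hc, List.count_cons_self]
        push_cast; ring
      · have hne : (k == c) = false := by simp [hkc]
        rw [if_neg hkc, hne, List.count_cons_of_ne (fun h => hkc h.symm)]
        simp
    · rw [if_neg hc]
      rw [ih _ hnd]
      by_cases hk : d.contains k = true
      · have hkc : k ≠ c := fun h => hc (h ▸ hk)
        rw [List.count_cons_of_ne (fun h => hkc h.symm)]
      · simp [hk]

-- on a sorted list, the count of k is the width of its run: bisect_right - bisect_left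
theorem pv_count_eq_bisect (s : List Int) (k : Int) (hs : s.Pairwise (· ≤ ·)) :
    (s.count k : Int)
      = (PySem.List.bisectRight s k : Int) - (PySem.List.bisectLeft s k : Int) := by
  obtain ⟨hblen, hbl1, hbl2⟩ := PySem.List.bisectLeft_spec s k hs
  obtain ⟨hrlen, hbr1, hbr2⟩ := PySem.List.bisectRight_spec s k hs
  set bl := PySem.List.bisectLeft s k with hbl
  set br := PySem.List.bisectRight s k with hbr
  have hle : bl ≤ br := by
    by_contra h
    push Not at h
    have hbrlt : br < s.length := lt_of_lt_of_le h hblen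
    have h1 := hbl1 br hbrlt h
    have h2 := hbr2 br hbrlt (le_refl br)
    omega
  -- split s into the three regions
  have hsplit : s = s.take bl ++ (s.drop bl).take (br - bl) ++ s.drop br := by
    have hdd : List.drop br s = List.drop (br - bl) (List.drop bl s) := by
      rw [List.drop_drop]; congr 1; omega
    rw [List.append_assoc, hdd, List.take_append_drop, List.take_append_drop]
  have c1 : (s.take bl).count k = 0 := by
    rw [List.count_eq_zero]
    intro hk
    obtain ⟨j, hj, hjv⟩ := List.mem_iff_getElem.mp hk
    have hjlen : j < s.length := by
      have := hj; simp [List.length_take] at this; omega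
    have hjbl : j < bl := by
      have := hj; simp [List.length_take] at this; omega
    have := hbl1 j hjlen hjbl
    rw [List.getElem_take] at hjv
    omega
  have c3 : (s.drop br).count k = 0 := by
    rw [List.count_eq_zero]
    intro hk
    obtain ⟨j, hj, hjv⟩ := List.mem_iff_getElem.mp hk
    have hjlen : br + j < s.length := by
      have := hj; simp [List.length_drop] at this; omega
    have := hbr2 (br + j) hjlen (Nat.le_add_right _ _)
    rw [List.getElem_drop] at hjv
    omega
  have c2 : ((s.drop bl).take (br - bl)).count k = ((s.drop bl).take (br - bl)).length := by
    rw [List.count_eq_length]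
    intro b hb
    obtain ⟨j, hj, hjv⟩ := List.mem_iff_getElem.mp hb
    have hjbr : bl + j < br := by
      have := hj; simp [List.length_take] at this; omega
    have hjlen : bl + j < s.length := lt_of_lt_of_le hjbr hrlen
    have hlo := hbl2 (bl + j) hjlen (Nat.le_add_right _ _)
    have hhi := hbr1 (bl + j) hjlen hjbr
    rw [List.getElem_take, List.getElem_drop] at hjv
    omega
  have clen : ((s.drop bl).take (br - bl)).length = br - bl := by
    simp [List.length_take, List.length_drop]
    omega
  calc (s.count k : Int)
      = (((s.take bl ++ (s.drop bl).take (br - bl) ++ s.drop br).count k : Nat) : Int) := by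
        rw [← hsplit]
    _ = ((br - bl : Nat) : Int) := by
        rw [List.count_append, List.count_append, c1, c3, c2, clen]; simp
    _ = (br : Int) - (bl : Int) := by omega

-- ===== VERDICT (by name: the statement is the Claim_ definition above) =====
theorem compte_spec : Claim_equal_compte := by
  intro M _
  show compte M = compte_alt M
  unfold compte compte_alt
  simp only
  rw [← List.foldl_flatten]
  set d0 : PySem.Dict Int Int :=
    PySem.Dict.ofList [(1,0),(2,0),(3,0),(4,0),(5,0),(6,0),(7,0),(8,0),(9,0),(10,0),(11,0)] with hd0
  set l := M.flatten with hl
  have hnd0 : d0.keys.Nodup := by rw [hd0]; decide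
  have hkeys := pv_step_keys l d0
  have hnd : (l.foldl (fun occ cell => if occ.contains cell then occ.modify cell 0 (· + 1) else occ) d0).keys.Nodup := by
    rw [hkeys]; exact hnd0
  rw [PySem.Dict.items_eq_map_keys _ hnd 0, hkeys]
  have hrange : PySem.List.pyRange 1 12 1 = [1,2,3,4,5,6,7,8,9,10,11] := by decide
  have hk0 : d0.keys = [1,2,3,4,5,6,7,8,9,10,11] := by rw [hd0]; decide
  have hflat : M.flatMap (fun row => row) = l := by simp [hl]
  rw [hrange, hk0, hflat]
  apply List.map_congr_left
  intro k hk
  have h := pv_step_getD l d0 hnd0 k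
  have hck : d0.contains k = true := by fin_cases hk <;> (rw [hd0]; decide)
  have hg0 : d0.getD k 0 = 0 := by fin_cases hk <;> (rw [hd0]; decide)
  rw [h, hck, if_pos rfl, hg0, zero_add]
  have hpair : (PySem.List.sorted l (fun x => x) false).Pairwise (· ≤ ·) := by
    have := PySem.List.sorted_pairwise (xs := l) (key := fun x => x)
    simpa using this
  have hperm : (PySem.List.sorted l (fun x => x) false).Perm l :=
    PySem.List.sorted_perm l (fun x => x) false
  rw [Prod.mk.injEq]
  refine ⟨rfl, ?_⟩
  rw [← pv_count_eq_bisect _ _ hpair]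
  exact_mod_cast (hperm.count_eq k).symm
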